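-- pv_equiv track=rewrite | github.com/hkyoo52/Algorithm | 백준/bj_2108.py | many
-- ===== SOURCE A (Python) =====
-- def many(arr):
--     num_dict={}
--     for i in arr:
--         if i in num_dict.keys():
--             num_dict[i] +=1
--         else:
--             num_dict[i] = 1
--     num_dict = sorted(num_dict.items())
--     num_dict = sorted(num_dict,key=lambda x:x[1],reverse=True)
--     if len(num_dict)>1 and num_dict[0][1] == num_dict[1][1]:
--         return num_dict[1][0]
--     return num_dict[0][0]
-- ===== SOURCE B (Python) =====
-- def many(arr):
--     cnt = {}
--     for x in arr:
--         cnt[x] = cnt.get(x, 0) + 1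
--     m = max(cnt.values())
--     modes = [k for k, c in cnt.items() if c == m]
--     k1 = min(modes)
--     rest = [k for k in modes if k != k1]
--     return min(rest) if rest else k1
-- ===== Notes on version B (the rewrite author's own statement) =====
-- stated objective: faster
-- what changed: B replaces A's two stable sorts of the count-dict items by linear scans: one max over the counts, then min and second-min over the keys attaining it, so no sorting at all.
import Mathlib
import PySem

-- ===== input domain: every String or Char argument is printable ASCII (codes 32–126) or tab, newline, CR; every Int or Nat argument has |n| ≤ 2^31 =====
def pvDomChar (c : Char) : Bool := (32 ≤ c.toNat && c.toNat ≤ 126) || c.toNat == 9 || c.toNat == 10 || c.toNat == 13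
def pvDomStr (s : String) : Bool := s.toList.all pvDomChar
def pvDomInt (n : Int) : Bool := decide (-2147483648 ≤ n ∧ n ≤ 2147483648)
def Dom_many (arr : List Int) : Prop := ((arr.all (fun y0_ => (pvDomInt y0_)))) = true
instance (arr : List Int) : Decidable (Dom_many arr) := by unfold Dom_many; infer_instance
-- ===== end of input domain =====

-- B is faster: it replaces A's two stable sorts of the count-dict items by linear max/min scans; return values agree on nonempty lists.

-- ===== PORT A =====
def many (arr : List Int) : Int :=
  let d := arr.foldl
    (fun d i => if d.contains i then d.insert i (d.getD i 0 + 1) else d.insert i 1)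
    (PySem.Dict.empty : PySem.Dict Int Int)
  let l1 := PySem.List.sorted2 d.items (fun p => p.1) (fun p => p.2) false
  let l2 := PySem.List.sorted l1 (fun p => p.2) true
  if l2.length > 1 ∧ (PySem.List.pyGetD l2 0 (0, 0)).2 = (PySem.List.pyGetD l2 1 (0, 0)).2 then
    (PySem.List.pyGetD l2 1 (0, 0)).1
  else
    (PySem.List.pyGetD l2 0 (0, 0)).1

-- ===== PORT B =====
def many_alt (arr : List Int) : Int :=
  let cnt := arr.foldl (fun d x => d.insert x (d.getD x 0 + 1)) (PySem.Dict.empty : PySem.Dict Int Int)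
  match PySem.List.max? cnt.values (fun v => v) with
  | none => 0   -- unreachable under Pre_: Python's max() raises on an empty dict
  | some m =>
    let modes := (cnt.items.filter (fun p => p.2 == m)).map (fun p => p.1)
    match PySem.List.min? modes (fun k => k) with
    | none => 0 -- unreachable: modes contains the key attaining m
    | some k1 =>
      let rest := modes.filter (fun k => !(k == k1))
      match PySem.List.min? rest (fun k => k) with
      | none => k1
      | some k2 => k2

-- ===== PRECONDITION & SPEC =====
-- Pre_ excludes only the empty list, on which Python A raises IndexError (and B's max() raises ValueError).
def Pre_many (arr : List Int) : Prop := arr ≠ []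
instance (arr : List Int) : Decidable (Pre_many arr) := by unfold Pre_many; infer_instance
def pvWitness_many : List Int := [1, 2, 2, 3, 3]

def Spec_many (arr : List Int) (out : Int) : Prop := out = many_alt arr
instance (arr : List Int) (out : Int) : Decidable (Spec_many arr out) := by unfold Spec_many; infer_instance

-- ===== CLAIM (what is proved, stated in full; the proofs are below) =====
def Claim_equal_many : Prop := ∀ (arr : List Int), Dom_many arr → Pre_many arr → Spec_many arr (many arr)

-- ===== LEMMAS AND PROOFS =====

-- the two insertion orders used by A's sorts (reverse=False lexicographic; reverse=True by count)
def bef1 : (Int × Int) → (Int × Int) → Bool :=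
  fun a b => decide (a.1 < b.1) || (!decide (b.1 < a.1) && decide (a.2 < b.2))
def bef2 : (Int × Int) → (Int × Int) → Bool :=
  fun a b => decide (b.2 < a.2)

lemma sorted2_eq_foldl (xs : List (Int × Int)) :
    PySem.List.sorted2 xs (fun p => p.1) (fun p => p.2) false
      = xs.foldl (fun acc x => PySem.List.insertBy bef1 x acc) [] := rfl

lemma sortedrev_eq_foldl (xs : List (Int × Int)) :
    PySem.List.sorted xs (fun p => p.2) true
      = xs.foldl (fun acc x => PySem.List.insertBy bef2 x acc) [] := rfl

-- A's counting loop is the Counter loop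
lemma stepA_eq (d : PySem.Dict Int Int) (i : Int) :
    (if d.contains i then d.insert i (d.getD i 0 + 1) else d.insert i 1)
      = d.modify i 0 (· + 1) := by
  by_cases h : d.contains i = true
  · simp [PySem.Dict.modify, h]
  · have h' : d.get? i = none :=
      (PySem.Dict.get?_eq_none_iff_contains d i).2 (by simpa using h)
    simp [PySem.Dict.modify, PySem.Dict.getD, h', h]

lemma dictA_eq (arr : List Int) :
    arr.foldl
      (fun d i => if d.contains i then d.insert i (d.getD i 0 + 1) else d.insert i 1)
      (PySem.Dict.empty : PySem.Dict Int Int) = PySem.Dict.counter arr := by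
  unfold PySem.Dict.counter
  congr 1; funext d i; exact stepA_eq d i

lemma dictB_eq (arr : List Int) :
    arr.foldl (fun d x => d.insert x (d.getD x 0 + 1)) (PySem.Dict.empty : PySem.Dict Int Int)
      = PySem.Dict.counter arr := rfl

lemma insertBy_cons (b : (Int × Int) → (Int × Int) → Bool) (x y : Int × Int)
    (ys : List (Int × Int)) :
    PySem.List.insertBy b x (y :: ys)
      = if b x y then x :: y :: ys else y :: PySem.List.insertBy b x ys := rfl

-- inserting a fresh-keyed element keeps strict key order
lemma insertBy1_pairwise (x : Int × Int) (acc : List (Int × Int))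
    (hne : ∀ y ∈ acc, x.1 ≠ y.1)
    (hp : acc.Pairwise (fun a b => a.1 < b.1)) :
    (PySem.List.insertBy bef1 x acc).Pairwise (fun a b => a.1 < b.1) := by
  induction acc with
  | nil => simp [PySem.List.insertBy]
  | cons y ys ih =>
    rw [insertBy_cons]
    have hxy : x.1 ≠ y.1 := hne y (by simp)
    rcases List.pairwise_cons.mp hp with ⟨hyall, hys⟩
    by_cases hb : bef1 x y = true
    · rw [if_pos hb]
      have hxlt : x.1 < y.1 := by
        have h := hb
        simp only [bef1, Bool.or_eq_true, Bool.and_eq_true, decide_eq_true_eq,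
          Bool.not_eq_true', decide_eq_false_iff_not] at h
        rcases h with h | ⟨h, _⟩
        · exact h
        · omega
      refine List.pairwise_cons.mpr ⟨?_, hp⟩
      intro z hz
      rcases List.mem_cons.mp hz with rfl | hz
      · exact hxlt
      · exact lt_trans hxlt (hyall z hz)
    · rw [if_neg hb]
      have hylt : y.1 < x.1 := by
        have h1 : ¬ x.1 < y.1 := by
          intro h; exact hb (by simp [bef1, h])
        omega
      refine List.pairwise_cons.mpr ⟨?_, ih (fun z hz => hne z (by simp [hz])) hys⟩
      intro z hz
      rcases (PySem.List.insertBy_mem_iff _ _ _ _).mp hz with rfl | hz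
      · exact hylt
      · exact hyall z hz

lemma foldl_ins1_pairwise :
    ∀ (xs acc : List (Int × Int)), xs.Pairwise (fun a b => a.1 ≠ b.1) →
      (∀ x ∈ xs, ∀ y ∈ acc, x.1 ≠ y.1) →
      acc.Pairwise (fun a b => a.1 < b.1) →
      (xs.foldl (fun acc x => PySem.List.insertBy bef1 x acc) acc).Pairwise
        (fun a b => a.1 < b.1)
  | [], acc, _, _, hp => hp
  | x :: xs, acc, hxs, hcross, hp => by
    rcases List.pairwise_cons.mp hxs with ⟨hxall, hxs'⟩
    simp only [List.foldl_cons]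
    refine foldl_ins1_pairwise xs _ hxs' ?_ ?_
    · intro z hz y hy
      rcases (PySem.List.insertBy_mem_iff _ _ _ _).mp hy with rfl | hy
      · exact (hxall z hz).symm
      · exact hcross z (by simp [hz]) y hy
    · exact insertBy1_pairwise x acc (fun y hy => hcross x (by simp) y hy) hp

lemma insertBy_append_of_false (b : (Int × Int) → (Int × Int) → Bool) (x : Int × Int) :
    ∀ (A B : List (Int × Int)), (∀ y ∈ A, b x y = false) →
      PySem.List.insertBy b x (A ++ B) = A ++ PySem.List.insertBy b x B
  | [], B, _ => rfl
  | y :: A, B, h => by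
    rw [List.cons_append, insertBy_cons, if_neg (by simp [h y (by simp)]),
      insertBy_append_of_false b x A B (fun z hz => h z (by simp [hz]))]
    rfl

-- stability of the second (reverse) sort: elements with maximal count form the prefix, in order
lemma foldl_ins2_split (M : Int) :
    ∀ (xs A B : List (Int × Int)), (∀ p ∈ xs, p.2 ≤ M) → (∀ p ∈ A, p.2 = M) →
      (∀ p ∈ B, p.2 < M) →
      ∃ B', xs.foldl (fun acc x => PySem.List.insertBy bef2 x acc) (A ++ B)
              = (A ++ xs.filter (fun p => p.2 == M)) ++ B' ∧ (∀ p ∈ B', p.2 < M)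
  | [], A, B, _, _, hB => ⟨B, by simp, hB⟩
  | x :: xs, A, B, hxs, hA, hB => by
    simp only [List.foldl_cons]
    by_cases hx : x.2 = M
    · have hstep : PySem.List.insertBy bef2 x (A ++ B) = (A ++ [x]) ++ B := by
        rw [insertBy_append_of_false bef2 x A B
          (fun y hy => by simp [bef2, hA y hy, hx])]
        cases B with
        | nil => rw [show PySem.List.insertBy bef2 x [] = [x] from rfl]; simp
        | cons y ys =>
          rw [insertBy_cons, if_pos (by simp [bef2, hx]; exact hB y (by simp))]
          simp
      rw [hstep]
      obtain ⟨B', hB'eq, hB'⟩ := foldl_ins2_split M xs (A ++ [x]) B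
        (fun p hp => hxs p (by simp [hp]))
        (fun p hp => by rcases (List.mem_append.mp hp) with h | h
                        · exact hA p h
                        · simp at h; subst h; exact hx)
        hB
      refine ⟨B', ?_, hB'⟩
      rw [hB'eq, List.filter_cons_of_pos (by simp [hx])]
      simp
    · have hlt : x.2 < M := lt_of_le_of_ne (hxs x (by simp)) hx
      have hstep : PySem.List.insertBy bef2 x (A ++ B)
          = A ++ PySem.List.insertBy bef2 x B :=
        insertBy_append_of_false bef2 x A B
          (fun y hy => by simp [bef2, hA y hy]; omega)
      rw [hstep]
      obtain ⟨B', hB'eq, hB'⟩ := foldl_ins2_split M xs A (PySem.List.insertBy bef2 x B)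
        (fun p hp => hxs p (by simp [hp]))
        hA
        (fun p hp => by rcases (PySem.List.insertBy_mem_iff _ _ _ _).mp hp with rfl | hp
                        · exact hlt
                        · exact hB p hp)
      refine ⟨B', ?_, hB'⟩
      rw [hB'eq, List.filter_cons_of_neg (by simp [hx])]

-- ===== VERDICT (by name: the statement is the Claim_ definition above) =====
theorem many_spec : Claim_equal_many := by
  intro arr _ hpre
  unfold Spec_many many many_alt
  simp only [dictA_eq, dictB_eq]
  set d := PySem.Dict.counter arr with hd
  -- keys are distinct
  have hknodup : (d.items.map (fun p => p.1)).Nodup := PySem.Dict.nodup_keys_counter arr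
  have hLpair : d.items.Pairwise (fun a b => a.1 ≠ b.1) := by
    have := List.pairwise_map.mp hknodup
    exact this
  -- items nonempty
  have hkeys : d.keys = PySem.Set.ofList arr := PySem.Dict.keys_counter arr
  have hitems_ne : d.items ≠ [] := by
    intro h
    rcases List.exists_mem_of_ne_nil arr hpre with ⟨a, ha⟩
    have : a ∈ d.keys := by rw [hkeys]; exact (PySem.Set.mem_ofList arr a).mpr ha
    rw [show d.keys = d.items.map (fun p => p.1) from rfl, h] at this
    simp at this
  -- the maximal count M
  obtain ⟨M, hM⟩ : ∃ M, PySem.List.max? d.values (fun v => v) = some M := by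
    cases h : PySem.List.max? d.values (fun v => v) with
    | none =>
      exfalso
      have : d.values = [] := (PySem.List.max?_eq_none_iff _ _).mp h
      exact hitems_ne (by simpa [PySem.Dict.values] using this)
    | some m => exact ⟨m, rfl⟩
  have hMmax : ∀ p ∈ d.items, p.2 ≤ M := by
    intro p hp
    refine PySem.List.max?_isMax hM p.2 ?_
    rw [show d.values = d.items.map (fun p => p.2) from rfl]
    exact List.mem_map.mpr ⟨p, hp, rfl⟩
  have hMattain : ∃ p ∈ d.items, p.2 = M := by
    have h := PySem.List.max?_mem hM
    rw [show d.values = d.items.map (fun p => p.2) from rfl] at h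
    rcases List.mem_map.mp h with ⟨p, hp, hpe⟩
    exact ⟨p, hp, hpe⟩
  simp only [hM]
  -- the first sort: a strictly key-increasing permutation of items
  set s1 := PySem.List.sorted2 d.items (fun p => p.1) (fun p => p.2) false with hs1
  have hs1perm : s1.Perm d.items := PySem.List.sorted2_perm _ _ _ _
  have hs1pair : s1.Pairwise (fun a b => a.1 < b.1) := by
    rw [hs1, sorted2_eq_foldl]
    exact foldl_ins1_pairwise d.items [] hLpair (by simp) (by simp)
  have hs1mem : ∀ p, p ∈ s1 ↔ p ∈ d.items := fun p => hs1perm.mem_iff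
  -- the second sort splits into max-count prefix T and a low remainder
  obtain ⟨B', hsplit, hB'⟩ := foldl_ins2_split M s1 [] []
    (fun p hp => hMmax p ((hs1mem p).mp hp)) (by simp) (by simp)
  have hs2 : PySem.List.sorted s1 (fun p => p.2) true
      = s1.filter (fun p => p.2 == M) ++ B' := by
    rw [sortedrev_eq_foldl]; simpa using hsplit
  set T := s1.filter (fun p => p.2 == M) with hT
  have hTmem : ∀ p, p ∈ T ↔ p ∈ d.items ∧ p.2 = M := by
    intro p
    rw [hT, List.mem_filter]
    simp [hs1mem p]
  have hTpair : T.Pairwise (fun a b => a.1 < b.1) := hs1pair.filter _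
  have hTne : T ≠ [] := by
    rcases hMattain with ⟨p, hp, hpM⟩
    intro h
    have : p ∈ T := (hTmem p).mpr ⟨hp, hpM⟩
    rw [h] at this; simp at this
  -- B's mode keys are exactly the keys of T
  have hmodes : ∀ k, k ∈ (d.items.filter (fun p => p.2 == M)).map (fun p => p.1)
      ↔ ∃ p ∈ T, p.1 = k := by
    intro k
    simp only [List.mem_map, List.mem_filter]
    constructor
    · rintro ⟨p, ⟨hp, hpM⟩, rfl⟩
      exact ⟨p, (hTmem p).mpr ⟨hp, by simpa using hpM⟩, rfl⟩
    · rintro ⟨p, hp, rfl⟩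
      rcases (hTmem p).mp hp with ⟨hpd, hpM⟩
      exact ⟨p, ⟨hpd, by simpa using hpM⟩, rfl⟩
  cases hTc : T with
  | nil => exact absurd hTc hTne
  | cons t0 ts =>
    have ht0T : t0 ∈ T := by rw [hTc]; simp
    have ht0M : t0.2 = M := ((hTmem t0).mp ht0T).2
    -- B's first minimum is t0's key
    obtain ⟨k1, hk1⟩ : ∃ k1, PySem.List.min?
        ((d.items.filter (fun p => p.2 == M)).map (fun p => p.1)) (fun k => k) = some k1 := by
      cases h : PySem.List.min? ((d.items.filter (fun p => p.2 == M)).map (fun p => p.1))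
          (fun k => k) with
      | none =>
        exfalso
        have := (PySem.List.min?_eq_none_iff _ _).mp h
        have ht0 : t0.1 ∈ (d.items.filter (fun p => p.2 == M)).map (fun p => p.1) :=
          (hmodes t0.1).mpr ⟨t0, ht0T, rfl⟩
        rw [this] at ht0; simp at ht0
      | some k => exact ⟨k, rfl⟩
    have hk1t0 : k1 = t0.1 := by
      have hle : k1 ≤ t0.1 :=
        PySem.List.min?_isMin hk1 t0.1 ((hmodes t0.1).mpr ⟨t0, ht0T, rfl⟩)
      have hge : t0.1 ≤ k1 := by
        rcases (hmodes k1).mp (PySem.List.min?_mem hk1) with ⟨p, hp, rfl⟩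
        rw [hTc] at hp
        rcases List.mem_cons.mp hp with rfl | hp
        · exact le_refl _
        · have := (List.pairwise_cons.mp (hTc ▸ hTpair)).1 p hp
          omega
      omega
    simp only [hk1]
    cases htsc : ts with
    | nil =>
      -- a unique mode: both return t0's key
      have hrest : ((d.items.filter (fun p => p.2 == M)).map (fun p => p.1)).filter
          (fun k => !(k == k1)) = [] := by
        rw [List.filter_eq_nil_iff]
        intro k hk
        rcases (hmodes k).mp hk with ⟨p, hp, rfl⟩
        rw [hTc, htsc] at hp
        simp only [List.mem_singleton] at hp
        subst hp
        simp [hk1t0]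
      simp only [hrest]
      have hmin_none : PySem.List.min? ([] : List Int) (fun k => k) = none := rfl
      simp only [hmin_none]
      rw [hs2, hTc, htsc]
      cases hB'c : B' with
      | nil => simp [PySem.List.pyGetD_zero_cons, hk1t0]
      | cons y ys =>
        have hyM : y.2 < M := hB' y (by rw [hB'c]; simp)
        have hcond : ¬ ((([t0] ++ y :: ys : List (Int × Int)).length > 1) ∧
            (PySem.List.pyGetD ([t0] ++ y :: ys) 0 (0, 0)).2
              = (PySem.List.pyGetD ([t0] ++ y :: ys) 1 (0, 0)).2) := by
          intro ⟨_, h2⟩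
          have h0 : PySem.List.pyGetD ([t0] ++ y :: ys) 0 (0, 0) = t0 := by
            simp [PySem.List.pyGetD_ofNat', List.getD]
          have h1 : PySem.List.pyGetD ([t0] ++ y :: ys) 1 (0, 0) = y := by
            simp [PySem.List.pyGetD_ofNat', List.getD]
          rw [h0, h1] at h2
          omega
        rw [if_neg hcond]
        have h0 : PySem.List.pyGetD ([t0] ++ y :: ys) 0 (0, 0) = t0 := by
          simp [PySem.List.pyGetD_ofNat', List.getD]
        rw [h0, hk1t0]
    | cons t1 ts' =>
      -- at least two modes: both return the second-smallest mode key, t1's key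
      have ht1T : t1 ∈ T := by rw [hTc, htsc]; simp
      have ht1M : t1.2 = M := ((hTmem t1).mp ht1T).2
      have ht01 : t0.1 < t1.1 := by
        have := (List.pairwise_cons.mp (hTc ▸ hTpair)).1 t1 (by rw [htsc]; simp)
        exact this
      have ht1rest : t1.1 ∈ ((d.items.filter (fun p => p.2 == M)).map (fun p => p.1)).filter
          (fun k => !(k == k1)) := by
        rw [List.mem_filter]
        refine ⟨(hmodes t1.1).mpr ⟨t1, ht1T, rfl⟩, ?_⟩
        simp [hk1t0]
        omega
      obtain ⟨k2, hk2⟩ : ∃ k2, PySem.List.min?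
          (((d.items.filter (fun p => p.2 == M)).map (fun p => p.1)).filter
            (fun k => !(k == k1))) (fun k => k) = some k2 := by
        cases h : PySem.List.min? (((d.items.filter (fun p => p.2 == M)).map
            (fun p => p.1)).filter (fun k => !(k == k1))) (fun k => k) with
        | none =>
          exfalso
          have := (PySem.List.min?_eq_none_iff _ _).mp h
          rw [this] at ht1rest; simp at ht1rest
        | some k => exact ⟨k, rfl⟩
      have hk2t1 : k2 = t1.1 := by
        have hle : k2 ≤ t1.1 := PySem.List.min?_isMin hk2 t1.1 ht1rest
        have hge : t1.1 ≤ k2 := by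
          have hmem := PySem.List.min?_mem hk2
          rw [List.mem_filter] at hmem
          rcases hmem with ⟨hmem, hne⟩
          rcases (hmodes k2).mp hmem with ⟨p, hp, rfl⟩
          rw [hTc, htsc] at hp
          rcases List.mem_cons.mp hp with rfl | hp
          · exfalso; simp [hk1t0] at hne
          rcases List.mem_cons.mp hp with rfl | hp
          · exact le_refl _
          · have hpair := hTc ▸ hTpair
            rw [htsc] at hpair
            have := (List.pairwise_cons.mp (List.pairwise_cons.mp hpair).2).1 p hp
            omega
        omega
      simp only [hk2]
      rw [hs2, hTc, htsc]
      have h0 : PySem.List.pyGetD ((t0 :: t1 :: ts') ++ B') 0 (0, 0) = t0 := by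
        simp [PySem.List.pyGetD_ofNat', List.getD]
      have h1 : PySem.List.pyGetD ((t0 :: t1 :: ts') ++ B') 1 (0, 0) = t1 := by
        simp [PySem.List.pyGetD_ofNat', List.getD]
      rw [if_pos ⟨by simp, by rw [h0, h1, ht0M, ht1M]⟩, h1, hk2t1]
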